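-- pv_equiv track=rewrite | github.com/ClickHouse/ClickHouse | ci/jobs/docker_server.py | gen_tags
-- ===== SOURCE A (Python) =====
-- from typing import Dict, List
--
-- def gen_tags(version_str: str, tag_type: str) -> List[str]:
--     """
--     @tag_type release-latest, @version 22.2.2.2:
--     - latest
--     - 22
--     - 22.2
--     - 22.2.2
--     - 22.2.2.2
--     @tag_type release, @version 22.2.2.2:
--     - 22
--     - 22.2
--     - 22.2.2
--     - 22.2.2.2
--     @tag_type head:
--     - head
--     """
--     parts = version_str.split(".")
--     tags = []
--     if tag_type == "release-latest":
--         tags.append("latest")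
--         for i in range(len(parts)):
--             tags.append(".".join(parts[: i + 1]))
--     elif tag_type == "head":
--         tags.append(tag_type)
--     elif tag_type == "release":
--         for i in range(len(parts)):
--             tags.append(".".join(parts[: i + 1]))
--     else:
--         assert False, f"Invalid release type [{tag_type}]"
--     return tags
-- ===== SOURCE B (Python) =====
-- from typing import List
--
--
-- def gen_tags(version_str: str, tag_type: str) -> List[str]:
--     """Same tags as A, but the incremental prefixes are built by threading a
--     running string instead of re-joining a slice for every index."""
--     prefixes = []
--     current = None
--     for part in version_str.split("."):
--         current = part if current is None else current + "." + part
--         prefixes.append(current)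
--     if tag_type == "release-latest":
--         return ["latest"] + prefixes
--     if tag_type == "head":
--         return ["head"]
--     if tag_type == "release":
--         return prefixes
--     assert False, f"Invalid release type [{tag_type}]"
-- ===== Notes on version B (the rewrite author's own statement) =====
-- stated objective: simpler
-- what changed: B threads one running prefix string through a single pass over the parts instead of re-slicing and re-joining parts[:i+1] for every index, and dispatches with early returns instead of mutating a shared tags list.
import Mathlib
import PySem

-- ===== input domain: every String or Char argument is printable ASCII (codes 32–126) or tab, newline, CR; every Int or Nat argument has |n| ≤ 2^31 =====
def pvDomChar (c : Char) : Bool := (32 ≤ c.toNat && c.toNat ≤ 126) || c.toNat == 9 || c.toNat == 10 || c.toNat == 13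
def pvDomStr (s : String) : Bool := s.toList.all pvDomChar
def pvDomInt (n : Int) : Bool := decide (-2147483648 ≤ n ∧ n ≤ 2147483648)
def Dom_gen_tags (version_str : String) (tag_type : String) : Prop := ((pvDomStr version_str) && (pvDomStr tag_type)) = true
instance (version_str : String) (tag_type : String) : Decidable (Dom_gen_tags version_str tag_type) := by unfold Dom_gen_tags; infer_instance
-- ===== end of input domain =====

-- B builds the incremental prefixes by threading one running string through a single pass
-- over the dot-separated parts (early-return dispatch) instead of re-joining parts[:i+1]
-- for every index into a mutated tags list; objective: simpler.


-- ===== PORT A =====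
-- A: split on ".", then for each i in range(len(parts)) append ".".join(parts[:i+1]).
def gen_tags (version_str : String) (tag_type : String) : List String :=
  let parts := (PySem.Str.split? version_str ".").getD []   -- sep "." ≠ "", never none
  if tag_type == "release-latest" then
    (PySem.List.pyRange 0 parts.length 1).foldl
      (fun tags i => tags ++ [PySem.Str.join "." (PySem.List.slice parts none (some (i + 1)))])
      ["latest"]
  else if tag_type == "head" then
    [tag_type]
  else if tag_type == "release" then
    (PySem.List.pyRange 0 parts.length 1).foldl
      (fun tags i => tags ++ [PySem.Str.join "." (PySem.List.slice parts none (some (i + 1)))])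
      []
  else
    []   -- Python: assert False — excluded by Pre_gen_tags

-- ===== PORT B =====
-- running-accumulator loop: current = part on the first part, current + "." + part after
def pvPrefixLoop (current : String) : List String → List String
  | [] => []
  | part :: rest =>
    let c := current ++ "." ++ part
    c :: pvPrefixLoop c rest

def pvPrefixes : List String → List String
  | [] => []
  | part :: rest => part :: pvPrefixLoop part rest

def gen_tags_alt (version_str : String) (tag_type : String) : List String :=
  let prefixes := pvPrefixes ((PySem.Str.split? version_str ".").getD [])
  if tag_type == "release-latest" then "latest" :: prefixes
  else if tag_type == "head" then ["head"]
  else if tag_type == "release" then prefixes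
  else []   -- Python: assert False — excluded by Pre_gen_tags

-- ===== PRECONDITION & SPEC =====
-- Pre_ excludes exactly the tag types on which A's `assert False` raises AssertionError (B asserts too).
def Pre_gen_tags (version_str : String) (tag_type : String) : Prop :=
  tag_type = "release-latest" ∨ tag_type = "head" ∨ tag_type = "release"
instance (version_str : String) (tag_type : String) : Decidable (Pre_gen_tags version_str tag_type) := by
  unfold Pre_gen_tags; infer_instance
def pvWitness_gen_tags : String × String := ("22.2.2.2", "release-latest")

def Spec_gen_tags (version_str : String) (tag_type : String) (out : List String) : Prop := out = gen_tags_alt version_str tag_type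
instance (version_str : String) (tag_type : String) (out : List String) : Decidable (Spec_gen_tags version_str tag_type out) := by unfold Spec_gen_tags; infer_instance

-- ===== CLAIM (what is proved, stated in full; the proofs are below) =====
def Claim_equal_gen_tags : Prop := ∀ (version_str : String) (tag_type : String), Dom_gen_tags version_str tag_type → Pre_gen_tags version_str tag_type → Spec_gen_tags version_str tag_type (gen_tags version_str tag_type)

-- ===== LEMMAS AND PROOFS =====

lemma join_singleton (a : String) : PySem.Str.join "." [a] = a := by
  have h : (PySem.Str.join "." [a]).toList = a.toList := by
    simp [PySem.Str.toList_join, PySem.Chars.join, List.intercalate]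
  exact String.toList_inj.mp h

-- joining one more part into the head of the list
lemma join_cons_cons (a b : String) (l : List String) :
    PySem.Str.join "." (a :: b :: l) = PySem.Str.join "." ((a ++ "." ++ b) :: l) := by
  have h : (PySem.Str.join "." (a :: b :: l)).toList
      = (PySem.Str.join "." ((a ++ "." ++ b) :: l)).toList := by
    cases l with
    | nil => simp [PySem.Str.toList_join, PySem.Chars.join, List.intercalate]
    | cons x xs =>
      simp [PySem.Str.toList_join, PySem.Chars.join_cons_cons]
  exact String.toList_inj.mp h

lemma prefixLoop_spec (rest : List String) : ∀ (c : String),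
    pvPrefixLoop c rest
      = (List.range rest.length).map
          (fun i => PySem.Str.join "." ((c :: rest).take (i + 2))) := by
  induction rest with
  | nil => intro c; simp [pvPrefixLoop]
  | cons q r ih =>
    intro c
    simp only [pvPrefixLoop, ih (c ++ "." ++ q), List.length_cons,
      List.range_succ_eq_map, List.map_cons, List.map_map]
    refine List.cons_eq_cons.mpr ⟨?_, ?_⟩
    · rw [show (c :: q :: r).take (0 + 2) = [c, q] by simp [List.take]]
      rw [join_cons_cons c q []]
      exact (join_singleton (c ++ "." ++ q)).symm
    · apply List.map_congr_left
      intro i _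
      simp only [Function.comp]
      rw [show (c :: q :: r).take (i + 1 + 2) = c :: q :: r.take (i + 1) by simp [List.take],
          show ((c ++ "." ++ q) :: r).take (i + 2) = (c ++ "." ++ q) :: r.take (i + 1) by simp [List.take]]
      exact (join_cons_cons c q (r.take (i + 1))).symm

lemma prefixes_spec (parts : List String) :
    pvPrefixes parts
      = (List.range parts.length).map
          (fun i => PySem.Str.join "." (parts.take (i + 1))) := by
  cases parts with
  | nil => simp [pvPrefixes]
  | cons p rest =>
    simp only [pvPrefixes, prefixLoop_spec rest p, List.length_cons,
      List.range_succ_eq_map, List.map_cons, List.map_map]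
    refine List.cons_eq_cons.mpr ⟨?_, ?_⟩
    · rw [show (p :: rest).take (0 + 1) = [p] by simp [List.take]]
      exact (join_singleton p).symm
    · apply List.map_congr_left
      intro i _
      rfl

-- A's index loop produces the same prefix list
lemma loopA_spec (parts : List String) (init : List String) :
    (PySem.List.pyRange 0 parts.length 1).foldl
        (fun tags i => tags ++ [PySem.Str.join "." (PySem.List.slice parts none (some (i + 1)))])
        init
      = init ++ pvPrefixes parts := by
  rw [PySem.List.foldl_append_singleton_eq_map, prefixes_spec,
      show ((parts.length : Int)) = ((parts.length : Nat) : Int) from rfl,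
      PySem.List.pyRange_zero_natCast, List.map_map]
  congr 1
  apply List.map_congr_left
  intro i _
  simp only [Function.comp]
  rw [show ((i : Int) + 1) = ((i + 1 : Nat) : Int) by push_cast; ring,
      PySem.List.slice_to_natCast]

-- ===== VERDICT (by name: the statement is the Claim_ definition above) =====
theorem gen_tags_spec : Claim_equal_gen_tags := by
  intro version_str tag_type _ hpre
  unfold Spec_gen_tags gen_tags gen_tags_alt
  rcases hpre with h | h | h <;> subst h <;>
    simp only [String.reduceBEq, beq_self_eq_true, Bool.false_eq_true, if_true, if_false,
      ] <;>
    rw [loopA_spec] <;> rfl
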